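-- pv_equiv track=rewrite | github.com/YugenJarwal13/DIP_project | src/validator/entry_exit_validator.py | condensed_zone_sequence
-- ===== SOURCE A (Python) =====
-- def condensed_zone_sequence(zone_hist, min_confirm):
--     """
--     zone_hist: list of (frame_idx, zone_label_or_None)
--     returns list of confirmed zone labels in order (zones that had at least min_confirm consecutive frames)
--     """
--     condensed = []
--     for frame_idx, z in zone_hist:
--         if len(condensed) == 0:
--             condensed.append([z,1,frame_idx])
--         else:
--             if condensed[-1][0] == z:
--                 condensed[-1][1] += 1
--                 condensed[-1][2] = frame_idx
--             else:
--                 condensed.append([z,1,frame_idx])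
--     confirmed = [entry[0] for entry in condensed if entry[0] is not None and entry[1] >= min_confirm]
--     return confirmed, condensed
-- ===== SOURCE B (Python) =====
-- def condensed_zone_sequence(zone_hist, min_confirm):
--     # Two-pointer run scan: each run of equal labels is found with an inner scan
--     # and appended once (no mutation of the last entry).
--     condensed = []
--     i, n = 0, len(zone_hist)
--     while i < n:
--         z = zone_hist[i][1]
--         j = i + 1
--         while j < n and zone_hist[j][1] == z:
--             j += 1
--         condensed.append([z, j - i, zone_hist[j - 1][0]])
--         i = j
--     confirmed = [z for z, cnt, _ in condensed if z is not None and cnt >= min_confirm]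
--     return confirmed, condensed
-- ===== Notes on version B (the rewrite author's own statement) =====
-- stated objective: alternative
-- what changed: Replaces A's fold that mutates the last condensed entry in place with a two-pointer run scan that finds each maximal run of equal labels with an inner scan and appends it once.
import Mathlib
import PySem

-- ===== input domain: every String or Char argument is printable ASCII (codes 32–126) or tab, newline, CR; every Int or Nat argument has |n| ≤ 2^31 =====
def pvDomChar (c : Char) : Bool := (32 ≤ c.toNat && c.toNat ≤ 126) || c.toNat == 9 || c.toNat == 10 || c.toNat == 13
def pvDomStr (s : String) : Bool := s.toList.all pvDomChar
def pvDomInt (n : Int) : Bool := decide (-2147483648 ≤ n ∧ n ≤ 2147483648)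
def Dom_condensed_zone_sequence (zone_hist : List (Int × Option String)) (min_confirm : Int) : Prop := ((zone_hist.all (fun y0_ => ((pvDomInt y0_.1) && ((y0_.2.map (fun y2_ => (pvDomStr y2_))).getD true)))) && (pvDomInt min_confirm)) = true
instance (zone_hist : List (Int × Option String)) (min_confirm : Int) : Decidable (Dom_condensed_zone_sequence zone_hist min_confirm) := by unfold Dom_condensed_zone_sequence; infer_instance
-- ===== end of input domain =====

-- B replaces A's mutate-last-entry fold with a two-pointer run scan that appends each maximal run once (same O(n) cost, alternative decomposition).

-- ===== PORT A =====
-- A's loop: condensed is built left to right; condensed[-1] is read and, on a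
-- matching label, its count is incremented and its frame overwritten in place.
def czsLast : List (Option String × Int × Int) → (Option String × Int × Int)
  | [] => (none, 0, 0)  -- unreachable: only applied to nonempty lists
  | [x] => x
  | _ :: (y :: ys) => czsLast (y :: ys)

-- the two in-place mutations 'condensed[-1][1] += 1; condensed[-1][2] = frame_idx'
def czsUpdLast (f : Int) : List (Option String × Int × Int) → List (Option String × Int × Int)
  | [] => []
  | [(z, c, _)] => [(z, c + 1, f)]
  | x :: (y :: ys) => x :: czsUpdLast f (y :: ys)

def czsStep (c : List (Option String × Int × Int)) (p : Int × Option String) : List (Option String × Int × Int) :=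
  if c.isEmpty then [(p.2, 1, p.1)]
  else if (czsLast c).1 == p.2 then czsUpdLast p.1 c
  else c ++ [(p.2, 1, p.1)]

def condensed_zone_sequence (zone_hist : List (Int × Option String)) (min_confirm : Int) : List String × (List (Option String × Int × Int)) :=
  let condensed := zone_hist.foldl czsStep []
  let confirmed := condensed.filterMap (fun e =>
    match e.1 with
    | some s => if min_confirm ≤ e.2.1 then some s else none
    | none => none)
  (confirmed, condensed)

-- ===== PORT B =====
-- B's outer while-loop: one recursive call per run; the inner scan 'while j < n
-- and zone_hist[j][1] == z' is the takeWhile, 'i = j' the dropWhile.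
def czsGroups : List (Int × Option String) → List (Option String × Int × Int)
  | [] => []
  | (f, z) :: rest =>
      let same := rest.takeWhile (fun p => p.2 == z)
      let grp := (f, z) :: same
      (z, (grp.length : Int), (grp.getLast (by simp)).1) ::
        czsGroups (rest.dropWhile (fun p => p.2 == z))
  termination_by l => l.length
  decreasing_by
    simp only [List.length_cons]
    exact Nat.lt_succ_of_le (List.length_dropWhile_le _ _)

def condensed_zone_sequence_alt (zone_hist : List (Int × Option String)) (min_confirm : Int) : List String × (List (Option String × Int × Int)) :=
  let condensed := czsGroups zone_hist
  let confirmed := condensed.filterMap (fun e =>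
    match e.1 with
    | some s => if min_confirm ≤ e.2.1 then some s else none
    | none => none)
  (confirmed, condensed)

-- ===== PRECONDITION & SPEC =====
def Spec_condensed_zone_sequence (zone_hist : List (Int × Option String)) (min_confirm : Int) (out : List String × (List (Option String × Int × Int))) : Prop := out = condensed_zone_sequence_alt zone_hist min_confirm
instance (zone_hist : List (Int × Option String)) (min_confirm : Int) (out : List String × (List (Option String × Int × Int))) : Decidable (Spec_condensed_zone_sequence zone_hist min_confirm out) := by unfold Spec_condensed_zone_sequence; infer_instance

-- ===== CLAIM (what is proved, stated in full; the proofs are below) =====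
def Claim_equal_condensed_zone_sequence : Prop := ∀ (zone_hist : List (Int × Option String)) (min_confirm : Int), Dom_condensed_zone_sequence zone_hist min_confirm → Spec_condensed_zone_sequence zone_hist min_confirm (condensed_zone_sequence zone_hist min_confirm)

-- ===== LEMMAS AND PROOFS =====
theorem czsLast_append {acc c : List (Option String × Int × Int)} (h : c ≠ []) :
    czsLast (acc ++ c) = czsLast c := by
  induction acc with
  | nil => rfl
  | cons a acc ih =>
      cases acc with
      | nil => cases c with
        | nil => exact absurd rfl h
        | cons b bs => rfl
      | cons a' acc' => simpa [czsLast] using ih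

theorem czsUpdLast_append (f : Int) {acc c : List (Option String × Int × Int)} (h : c ≠ []) :
    czsUpdLast f (acc ++ c) = acc ++ czsUpdLast f c := by
  induction acc with
  | nil => rfl
  | cons a acc ih =>
      cases acc with
      | nil => cases c with
        | nil => exact absurd rfl h
        | cons b bs => rfl
      | cons a' acc' => simpa [czsUpdLast] using ih

theorem czsUpdLast_ne_nil (f : Int) {c : List (Option String × Int × Int)} (h : c ≠ []) :
    czsUpdLast f c ≠ [] := by
  cases c with
  | nil => exact absurd rfl h
  | cons a as => cases as with
    | nil => obtain ⟨z, c0, f0⟩ := a; simp [czsUpdLast]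
    | cons b bs => simp [czsUpdLast]

theorem foldl_czsStep_shift (xs : List (Int × Option String)) :
    ∀ (acc c : List (Option String × Int × Int)), c ≠ [] →
      xs.foldl czsStep (acc ++ c) = acc ++ xs.foldl czsStep c := by
  induction xs with
  | nil => intro acc c h; rfl
  | cons x xs ih =>
      intro acc c h
      simp only [List.foldl_cons]
      have hne : (acc ++ c).isEmpty = false := by
        simp [h]
      have hce : c.isEmpty = false := by simp [h]
      unfold czsStep
      rw [hne, hce, czsLast_append h]
      by_cases hl : ((czsLast c).1 == x.2) = true
      · rw [if_pos hl, if_pos hl, czsUpdLast_append x.1 h]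
        exact ih acc _ (czsUpdLast_ne_nil x.1 h)
      · rw [if_neg hl, if_neg hl, List.append_assoc]
        exact ih acc (c ++ [(x.2, 1, x.1)]) (by simp)

-- last frame of a run, given the frame of the run's first element
def czsLastF (f : Int) (l : List (Int × Option String)) : Int :=
  (l.getLast?.map Prod.fst).getD f

theorem getLast_cons_fst (l : List (Int × Option String)) (a : Int × Option String) (h : a :: l ≠ []) :
    ((a :: l).getLast h).1 = czsLastF a.1 l := by
  induction l generalizing a with
  | nil => rfl
  | cons b bs ih => simpa [czsLastF, List.getLast, List.getLast?_cons] using ih b (by simp)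

theorem czsLastF_cons (f : Int) (a : Int × Option String) (l : List (Int × Option String)) :
    czsLastF f (a :: l) = czsLastF a.1 l := by
  cases l with
  | nil => rfl
  | cons b bs => simp [czsLastF, List.getLast?_cons]

theorem foldl_czsStep_run (rest : List (Int × Option String)) :
    ∀ (z : Option String) (c f : Int),
      rest.foldl czsStep [(z, c, f)] =
        (z, c + ((rest.takeWhile (fun p => p.2 == z)).length : Int),
          czsLastF f (rest.takeWhile (fun p => p.2 == z))) ::
        (rest.dropWhile (fun p => p.2 == z)).foldl czsStep [] := by
  induction rest with
  | nil => intro z c f; simp [czsLastF]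
  | cons x xs ih =>
      intro z c f
      obtain ⟨f2, z2⟩ := x
      by_cases hz : (z2 == z) = true
      · have hz' : (z == z2) = true := by
          simp only [beq_iff_eq] at hz ⊢; exact hz.symm
        simp only [List.foldl_cons, List.takeWhile_cons, List.dropWhile_cons, hz, if_true,
          czsStep, List.isEmpty_cons, czsLast, czsUpdLast, hz', Bool.false_eq_true, if_false]
        rw [ih z (c + 1) f2, czsLastF_cons]
        simp only [List.length_cons, List.cons.injEq, Prod.mk.injEq]
        refine ⟨⟨trivial, by push_cast; ring, trivial⟩, trivial⟩
      · have hz2 : (z2 == z) = false := by simpa using hz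
        have hz' : (z == z2) = false := beq_eq_false_iff_ne.mpr (Ne.symm (beq_eq_false_iff_ne.mp hz2))
        simp only [List.foldl_cons, List.takeWhile_cons, List.dropWhile_cons, hz2,
          Bool.false_eq_true, if_false]
        rw [show czsStep [(z, c, f)] (f2, z2) = [(z, c, f), (z2, 1, f2)] by
              simp [czsStep, czsLast, hz'],
            show czsStep [] (f2, z2) = [(z2, 1, f2)] by simp [czsStep]]
        have hs := foldl_czsStep_shift xs [(z, c, f)] [(z2, 1, f2)] (by simp)
        simp only [List.cons_append, List.nil_append] at hs
        rw [hs]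
        simp [czsLastF]

theorem czsGroups_eq (xs : List (Int × Option String)) :
    xs.foldl czsStep [] = czsGroups xs := by
  induction xs using czsGroups.induct with
  | case1 => simp [czsGroups]
  | case2 f z rest ih =>
      rw [czsGroups]
      simp only [List.foldl_cons, czsStep, List.isEmpty_nil, if_true]
      rw [foldl_czsStep_run rest z 1 f, ih, getLast_cons_fst]
      simp only [List.length_cons, List.cons.injEq, Prod.mk.injEq]
      refine ⟨⟨trivial, by push_cast; ring, trivial⟩, trivial⟩

-- ===== VERDICT (by name: the statement is the Claim_ definition above) =====
theorem condensed_zone_sequence_spec : Claim_equal_condensed_zone_sequence := by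
  intro zone_hist min_confirm _
  unfold Spec_condensed_zone_sequence
  simp [condensed_zone_sequence, condensed_zone_sequence_alt, czsGroups_eq]
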